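-- pv_equiv track=rewrite | github.com/pisterlabs/promptset | data/scraping-2.0/repos/eegAnalyzeTeam~eegAnalyze/coherence_code~eeg_coherence_each.py | coh_get_Section
-- ===== SOURCE A (Python) =====
-- def coh_get_Section(f, a, b):
--     start = -1
--     end = -1
--     for i in range(0, len(f)):
--         if start == -1 and f[i] > a:
--             start = i
--         if end == -1 and f[i] > b:
--             end = i
--             break
--     return start, end
-- ===== SOURCE B (Python) =====
-- def coh_get_Section(f, a, b):
--     end = next((i for i in range(len(f)) if f[i] > b), -1)
--     limit = end + 1 if end != -1 else len(f)
--     start = next((i for i in range(limit) if f[i] > a), -1)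
--     return start, end
-- ===== Notes on version B (the rewrite author's own statement) =====
-- stated objective: idiomatic
-- what changed: Replaces the single coupled loop with a break by two independent first-match searches (end first, then start over the prefix up to and including end), written with next() over generators.
import Mathlib
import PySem

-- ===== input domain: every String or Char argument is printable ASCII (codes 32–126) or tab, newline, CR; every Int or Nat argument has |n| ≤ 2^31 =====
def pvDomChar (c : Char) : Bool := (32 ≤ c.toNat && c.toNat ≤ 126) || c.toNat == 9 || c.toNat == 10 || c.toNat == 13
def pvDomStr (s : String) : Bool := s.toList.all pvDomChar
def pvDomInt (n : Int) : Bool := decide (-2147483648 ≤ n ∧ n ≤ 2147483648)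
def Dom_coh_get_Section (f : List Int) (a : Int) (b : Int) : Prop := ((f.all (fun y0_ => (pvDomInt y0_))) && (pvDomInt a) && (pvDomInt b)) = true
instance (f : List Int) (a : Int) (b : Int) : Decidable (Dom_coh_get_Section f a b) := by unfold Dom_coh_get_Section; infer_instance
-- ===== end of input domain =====

-- B replaces A's single coupled loop-with-break by two independent first-match searches (idiomatic; same cost).

-- ===== PORT A =====
-- A's for-loop with break: state (start, end), index carried along; break returns immediately.
def cohALoop (a : Int) (b : Int) : List Int → Nat → Int → Int → Int × Int
  | [], _, s, e => (s, e)
  | x :: rest, i, s, e =>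
    let s' := if s = -1 ∧ x > a then (i : Int) else s
    if e = -1 ∧ x > b then (s', (i : Int))
    else cohALoop a b rest (i + 1) s' e

def coh_get_Section (f : List Int) (a : Int) (b : Int) : Int × Int :=
  cohALoop a b f 0 (-1) (-1)

-- ===== PORT B =====
-- first index (as Python int, -1 if none) at which p holds, scanning from base index i
def firstIdx (p : Int → Prop) [DecidablePred p] : List Int → Nat → Int
  | [], _ => -1
  | x :: rest, i => if p x then (i : Int) else firstIdx p rest (i + 1)

def coh_get_Section_alt (f : List Int) (a : Int) (b : Int) : Int × Int :=
  let e := firstIdx (fun x => x > b) f 0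
  -- limit = end + 1 if end != -1 else len(f); e ≥ 0 when e ≠ -1, so toNat is exact
  let limit : Nat := if e ≠ -1 then (e + 1).toNat else f.length
  -- range(limit) scan = first-match search over the prefix of length limit
  let s := firstIdx (fun x => x > a) (f.take limit) 0
  (s, e)

-- ===== PRECONDITION & SPEC =====
def Spec_coh_get_Section (f : List Int) (a : Int) (b : Int) (out : Int × Int) : Prop := out = coh_get_Section_alt f a b
instance (f : List Int) (a : Int) (b : Int) (out : Int × Int) : Decidable (Spec_coh_get_Section f a b out) := by unfold Spec_coh_get_Section; infer_instance

-- ===== CLAIM (what is proved, stated in full; the proofs are below) =====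
def Claim_equal_coh_get_Section : Prop := ∀ (f : List Int) (a : Int) (b : Int), Dom_coh_get_Section f a b → Spec_coh_get_Section f a b (coh_get_Section f a b)

-- ===== LEMMAS AND PROOFS =====

-- length of the prefix A ever scans: up to and including the first element > b, else all of f
def scanLen (b : Int) : List Int → Nat
  | [] => 0
  | x :: rest => if x > b then 1 else 1 + scanLen b rest

lemma firstIdx_ge (p : Int → Prop) [DecidablePred p] :
    ∀ (f : List Int) (i : Nat), firstIdx p f i = -1 ∨ (i : Int) ≤ firstIdx p f i := by
  intro f
  induction f with
  | nil => intro i; left; rfl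
  | cons x rest ih =>
    intro i
    simp only [firstIdx]
    split
    · right; exact le_refl _
    · rcases ih (i + 1) with h | h
      · left; exact h
      · right
        refine le_trans ?_ h
        push_cast; omega

lemma limit_eq_scanLen (b : Int) :
    ∀ (f : List Int) (i : Nat),
      (if firstIdx (fun x => x > b) f i ≠ -1
         then (firstIdx (fun x => x > b) f i - (i : Int) + 1).toNat
         else f.length) = scanLen b f := by
  intro f
  induction f with
  | nil => intro i; simp [firstIdx, scanLen]
  | cons x rest ih =>
    intro i
    simp only [firstIdx, scanLen]
    by_cases hx : x > b
    · simp [hx]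
    · simp only [hx, if_false]
      rcases firstIdx_ge (fun x => x > b) rest (i + 1) with h | h
      · have := ih (i + 1)
        simp [h] at this ⊢
        omega
      · have hne : firstIdx (fun x => x > b) rest (i + 1) ≠ -1 := by
          intro hc; rw [hc] at h; push_cast at h; omega
        have := ih (i + 1)
        rw [if_pos hne] at this
        rw [if_pos hne]
        have h' : ((i : Int) + 1) ≤ firstIdx (fun x => x > b) rest (i + 1) := by
          exact_mod_cast h
        omega

-- once start is set (s ≠ -1) it never changes; the loop only searches for end
lemma cohALoop_set (a b : Int) :
    ∀ (f : List Int) (i : Nat) (s : Int), s ≠ -1 →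
      cohALoop a b f i s (-1) = (s, firstIdx (fun x => x > b) f i) := by
  intro f
  induction f with
  | nil => intro i s _; rfl
  | cons x rest ih =>
    intro i s hs
    simp only [cohALoop, firstIdx, hs, false_and, if_false]
    by_cases hx : x > b
    · simp [hx]
    · simp only [hx, and_false, if_false]
      exact ih (i + 1) s hs

lemma cohALoop_main (a b : Int) :
    ∀ (f : List Int) (i : Nat),
      cohALoop a b f i (-1) (-1) =
        (firstIdx (fun x => x > a) (f.take (scanLen b f)) i,
         firstIdx (fun x => x > b) f i) := by
  intro f
  induction f with
  | nil => intro i; rfl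
  | cons x rest ih =>
    intro i
    by_cases hx : x > b
    · simp [cohALoop, scanLen, firstIdx, hx, List.take]
    · have hscan : scanLen b (x :: rest) = 1 + scanLen b rest := by simp [scanLen, hx]
      have htake : (x :: rest).take (1 + scanLen b rest) = x :: rest.take (scanLen b rest) := by
        rw [Nat.add_comm]; rfl
      rw [hscan, htake]
      by_cases hxa : x > a
      · rw [show cohALoop a b (x :: rest) i (-1) (-1) = cohALoop a b rest (i + 1) (i : Int) (-1) from by
          simp [cohALoop, hx, hxa]]
        rw [cohALoop_set a b rest (i + 1) (i : Int) (by omega)]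
        simp [firstIdx, hx, hxa]
      · rw [show cohALoop a b (x :: rest) i (-1) (-1) = cohALoop a b rest (i + 1) (-1) (-1) from by
          simp [cohALoop, hx, hxa]]
        rw [ih (i + 1)]
        simp [firstIdx, hx, hxa]

-- ===== VERDICT (by name: the statement is the Claim_ definition above) =====
theorem coh_get_Section_spec : Claim_equal_coh_get_Section := by
  intro f a b _
  unfold Spec_coh_get_Section coh_get_Section coh_get_Section_alt
  rw [cohALoop_main a b f 0]
  have hl := limit_eq_scanLen b f 0
  simp only [Nat.cast_zero, sub_zero] at hl
  show _ = (firstIdx (fun x => x > a)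
      (f.take (if firstIdx (fun x => x > b) f 0 ≠ -1
               then (firstIdx (fun x => x > b) f 0 + 1).toNat else f.length)) 0,
    firstIdx (fun x => x > b) f 0)
  rw [hl]
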